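-- pv_equiv track=rewrite | github.com/use-ash/apex | setup/scanner.py | _is_excluded_dir
-- ===== SOURCE A (Python) =====
-- import fnmatch
--
-- ALWAYS_EXCLUDE_DIRS: set[str] = {
--     "node_modules", ".git", "__pycache__", ".venv", "venv", "env",
--     ".env", "build", "dist", ".next", "target", ".tox", ".mypy_cache",
--     ".pytest_cache", ".eggs", "*.egg-info", ".terraform",
-- }
--
-- def _is_excluded_dir(name: str) -> bool:
--     """Check if a directory name matches any exclusion pattern."""
--     for pattern in ALWAYS_EXCLUDE_DIRS:
--         if "*" in pattern or "?" in pattern: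
--             if fnmatch.fnmatch(name, pattern):
--                 return True
--         elif name == pattern:
--             return True
--     return False
-- ===== SOURCE B (Python) =====
-- # Directory names excluded from scanning: plain names, plus anything that looks
-- # like a Python egg-info directory.
-- EXACT_EXCLUDE_DIRS: frozenset[str] = frozenset({
--     "node_modules", ".git", "__pycache__", ".venv", "venv", "env",
--     ".env", "build", "dist", ".next", "target", ".tox", ".mypy_cache",
--     ".pytest_cache", ".eggs", ".terraform",
-- })
--
-- def _is_excluded_dir(name: str) -> bool:
--     """Check if a directory name matches any exclusion pattern."""
--     return name in EXACT_EXCLUDE_DIRS or name.endswith(".egg-info")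
-- ===== Notes on version B (the rewrite author's own statement) =====
-- stated objective: simpler
-- what changed: Instead of looping over all 17 patterns and classifying each as glob vs exact per call, B does one frozenset membership test over the plain names plus an endswith('.egg-info') check, which is exactly what the single glob pattern '*.egg-info' matches.
import Mathlib
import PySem

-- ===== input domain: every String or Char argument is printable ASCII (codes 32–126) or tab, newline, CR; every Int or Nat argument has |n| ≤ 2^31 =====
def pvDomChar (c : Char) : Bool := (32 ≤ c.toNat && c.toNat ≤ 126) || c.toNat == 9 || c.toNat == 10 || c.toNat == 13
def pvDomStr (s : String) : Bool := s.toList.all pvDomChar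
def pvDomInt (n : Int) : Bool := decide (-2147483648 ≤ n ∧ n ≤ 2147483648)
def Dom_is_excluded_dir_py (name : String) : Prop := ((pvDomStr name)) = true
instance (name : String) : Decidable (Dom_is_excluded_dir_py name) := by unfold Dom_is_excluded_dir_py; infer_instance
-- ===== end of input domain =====

-- B replaces the per-call classify-and-match loop over all 17 patterns by one set
-- membership test over the plain names plus an endswith(".egg-info") check (what the
-- single glob pattern "*.egg-info" matches); same return value.

-- ===== PORT A =====

-- `"*" in pattern` / `"?" in pattern` for a one-char needle = char membership (exact)
def pvHasGlob (p : String) : Bool := p.toList.any (· == '*') || p.toList.any (· == '?')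

-- port of the library call fnmatch.fnmatch, for patterns built from literals, '*' and
-- '?': exact on such patterns (no '[' classes occur in ALWAYS_EXCLUDE_DIRS); on POSIX
-- fnmatch's normcase is the identity, '*'/'?' match any characters, whole-string match.
def pvGlobMatch : List Char → List Char → Bool
  | [], s => s.isEmpty
  | c :: ps, s =>
    if c = '*' then
      (List.range (s.length + 1)).any (fun i => pvGlobMatch ps (s.drop i))
    else
      match s with
      | [] => false
      | m :: st => (c == '?' || c == m) && pvGlobMatch ps st

def pvFnmatch (name pattern : String) : Bool := pvGlobMatch pattern.toList name.toList

-- the Python set literal, in source order (set iteration order is irrelevant to the result)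
def pvAlwaysExcludeDirs : List String :=
  ["node_modules", ".git", "__pycache__", ".venv", "venv", "env",
   ".env", "build", "dist", ".next", "target", ".tox", ".mypy_cache",
   ".pytest_cache", ".eggs", "*.egg-info", ".terraform"]

-- the for-loop with early return
def pvLoopA (name : String) : List String → Bool
  | [] => false
  | pattern :: rest =>
    if pvHasGlob pattern then
      if pvFnmatch name pattern then true else pvLoopA name rest
    else if name == pattern then true
    else pvLoopA name rest

def is_excluded_dir_py (name : String) : Bool := pvLoopA name pvAlwaysExcludeDirs

-- ===== PORT B =====

-- module-level set of plain names, as in Source B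
def pvExactExcludeDirs : List String :=
  ["node_modules", ".git", "__pycache__", ".venv", "venv", "env",
   ".env", "build", "dist", ".next", "target", ".tox", ".mypy_cache",
   ".pytest_cache", ".eggs", ".terraform"]

def is_excluded_dir_py_alt (name : String) : Bool :=
  pvExactExcludeDirs.contains name || PySem.Str.endswith name ".egg-info"

-- ===== PRECONDITION & SPEC =====
def Spec_is_excluded_dir_py (name : String) (out : Bool) : Prop := out = is_excluded_dir_py_alt name
instance (name : String) (out : Bool) : Decidable (Spec_is_excluded_dir_py name out) := by unfold Spec_is_excluded_dir_py; infer_instance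

-- ===== CLAIM =====
def Claim_equal_is_excluded_dir_py : Prop := ∀ (name : String), Dom_is_excluded_dir_py name → Spec_is_excluded_dir_py name (is_excluded_dir_py name)

-- ===== LEMMAS AND PROOFS =====

-- A's loop over any pattern list equals B's shape on the partition of that list
theorem pvLoopA_eq (name : String) (L : List String) :
    pvLoopA name L =
      ((L.filter (fun p => !pvHasGlob p)).contains name ||
        (L.filter (fun p => pvHasGlob p)).any (fun p => pvFnmatch name p)) := by
  induction L with
  | nil => rfl
  | cons p rest ih =>
    simp only [pvLoopA, List.filter_cons]
    by_cases hg : pvHasGlob p = true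
    · by_cases hm : pvFnmatch name p = true
      · simp [hg, hm]
      · simp [hg, hm, ih]
    · by_cases he : (name == p) = true
      · have : name = p := eq_of_beq he
        simp [hg, this]
      · have hne : name ≠ p := fun h => he (by simp [h])
        simp [hg, hne, ih]

-- the literal partition of A's pattern list: its plain names are B's set, its globs ["*.egg-info"]
theorem pvFilter_exact :
    pvAlwaysExcludeDirs.filter (fun p => !pvHasGlob p) = pvExactExcludeDirs := by decide

theorem pvFilter_glob :
    pvAlwaysExcludeDirs.filter (fun p => pvHasGlob p) = ["*.egg-info"] := by decide

-- a glob-free pattern matches exactly itself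
theorem pvGlobMatch_lit (ps : List Char)
    (hp : ∀ c ∈ ps, c ≠ '*' ∧ c ≠ '?') (t : List Char) :
    pvGlobMatch ps t = (t == ps) := by
  induction ps generalizing t with
  | nil => cases t <;> rfl
  | cons c cs ih =>
    have h1 : c ≠ '*' := (hp c (by simp)).1
    have h2 : c ≠ '?' := (hp c (by simp)).2
    have hrest : ∀ d ∈ cs, d ≠ '*' ∧ d ≠ '?' := fun d hd => hp d (by simp [hd])
    cases t with
    | nil => simp [pvGlobMatch, h1]
    | cons m ts =>
      simp only [pvGlobMatch, if_neg h1, ih hrest, List.cons_beq_cons]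
      simp [BEq.comm, beq_eq_false_iff_ne.mpr h2]

-- "*.egg-info" matches a name iff the name ends with ".egg-info"
set_option maxRecDepth 8000 in
theorem pvFnmatch_egg (name : String) :
    pvFnmatch name "*.egg-info" = PySem.Str.endswith name ".egg-info" := by
  have hchars : (".egg-info" : String).toList = ['.','e','g','g','-','i','n','f','o'] := by rfl
  have hlit : ∀ t, pvGlobMatch ".egg-info".toList t = (t == ".egg-info".toList) := by
    intro t
    rw [hchars]
    exact pvGlobMatch_lit _ (by simp) t
  have hpat : ("*.egg-info" : String).toList = '*' :: ".egg-info".toList := by decide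
  have hstar : ∀ s : List Char, pvGlobMatch ('*' :: ".egg-info".toList) s =
      (List.range (s.length + 1)).any (fun i => pvGlobMatch ".egg-info".toList (s.drop i)) := by
    intro s
    conv_lhs => rw [pvGlobMatch.eq_def]
    simp
  have hL : pvFnmatch name "*.egg-info" =
      (List.range (name.toList.length + 1)).any
        (fun i => name.toList.drop i == ".egg-info".toList) := by
    show pvGlobMatch ("*.egg-info".toList) name.toList = _
    rw [hpat, hstar]
    simp only [hlit]
  rw [hL, Bool.eq_iff_iff]
  simp only [List.any_eq_true, List.mem_range, beq_iff_eq,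
    PySem.Str.endswith_eq, PySem.Chars.endswith_iff]
  constructor
  · rintro ⟨i, _, hi⟩
    exact hi ▸ List.drop_suffix i _
  · intro hsuf
    refine ⟨name.toList.length - ".egg-info".toList.length, by omega, ?_⟩
    exact (List.suffix_iff_eq_drop.mp hsuf).symm

-- ===== VERDICT =====
theorem is_excluded_dir_py_spec : Claim_equal_is_excluded_dir_py := by
  intro name _
  unfold Spec_is_excluded_dir_py is_excluded_dir_py is_excluded_dir_py_alt
  rw [pvLoopA_eq, pvFilter_exact, pvFilter_glob]
  simp [pvFnmatch_egg]
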